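-- pv_equiv track=rewrite | github.com/ansigyeong/TIL | SWEA/A/2383.점심 식사시간.py | my_gen
-- ===== SOURCE A (Python) =====
-- def my_gen(people, stair):
--     for i in range(1 << len(people)):
--         g1 = [] # 집합 내 사람 - 계단1 거리 => 시간
--         g2 = [] # 집합 내 사람 - 계단2 거리 => 시간
--         for j in range(len(people)): # 거리두기
--             if i & (1 << j):
--                 dis = abs(people[j][0] - stair[0][0]) + abs(people[j][1] - stair[0][1])
--                 g1.append(dis)
--             else:
--                 dis = abs(people[j][0] - stair[1][0]) + abs(people[j][1] - stair[1][1])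
--                 g2.append(dis)
--         yield sorted(g1), sorted(g2)
-- ===== SOURCE B (Python) =====
-- def my_gen(people, stair):
--     # Recursive backtracking over persons from the last index down: group 2
--     # (bit clear) is tried before group 1, reproducing A's bitmask order.
--     def rec(j, g1, g2):
--         if j < 0:
--             yield sorted(g1), sorted(g2)
--             return
--         x, y = people[j]
--         d1 = abs(x - stair[0][0]) + abs(y - stair[0][1])
--         d2 = abs(x - stair[1][0]) + abs(y - stair[1][1])
--         yield from rec(j - 1, g1, [d2] + g2)
--         yield from rec(j - 1, [d1] + g1, g2)
--     yield from rec(len(people) - 1, [], [])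
-- ===== Notes on version B (the rewrite author's own statement) =====
-- stated objective: alternative
-- what changed: Replaces A's bitmask enumeration (outer loop over 2^n masks with an inner index loop testing bit j) by a recursive backtracking generator that assigns each person, from the last index down, to group 2 then group 1, building the distance lists incrementally.
import Mathlib
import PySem

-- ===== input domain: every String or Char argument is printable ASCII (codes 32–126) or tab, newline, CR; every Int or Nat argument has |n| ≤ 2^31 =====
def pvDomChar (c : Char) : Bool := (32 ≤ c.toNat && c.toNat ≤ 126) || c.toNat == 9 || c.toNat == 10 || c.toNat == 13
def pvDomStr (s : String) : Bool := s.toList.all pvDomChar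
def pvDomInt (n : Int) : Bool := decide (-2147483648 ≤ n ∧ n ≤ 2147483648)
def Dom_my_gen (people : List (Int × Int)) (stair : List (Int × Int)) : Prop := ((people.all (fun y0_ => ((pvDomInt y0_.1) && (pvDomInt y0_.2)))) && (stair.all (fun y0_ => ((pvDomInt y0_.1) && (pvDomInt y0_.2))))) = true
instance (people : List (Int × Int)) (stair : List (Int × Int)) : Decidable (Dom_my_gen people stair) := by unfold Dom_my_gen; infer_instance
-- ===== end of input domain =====

-- B replaces A's bitmask double loop by a recursive backtracking enumeration
-- (last person chooses first, group 2 before group 1); same yielded sequence.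

-- ===== PORT A =====
-- A's generator: for each bitmask i, an inner index loop splits people into
-- two distance lists by bit j of i, then yields the two sorted lists.
def my_gen (people : List (Int × Int)) (stair : List (Int × Int)) : List (List Int × List Int) :=
  (PySem.List.pyRange 0 ((1 : Int) <<< people.length) 1).map (fun i =>
    let g : List Int × List Int :=
      (PySem.List.pyRange 0 (people.length : Int) 1).foldl (fun g j =>
        if PySem.Int.band i ((1 : Int) <<< j.toNat) ≠ 0 then
          (g.1 ++ [|(PySem.List.pyGetD people j (0, 0)).1 - (PySem.List.pyGetD stair 0 (0, 0)).1| +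
                   |(PySem.List.pyGetD people j (0, 0)).2 - (PySem.List.pyGetD stair 0 (0, 0)).2|], g.2)
        else
          (g.1, g.2 ++ [|(PySem.List.pyGetD people j (0, 0)).1 - (PySem.List.pyGetD stair 1 (0, 0)).1| +
                        |(PySem.List.pyGetD people j (0, 0)).2 - (PySem.List.pyGetD stair 1 (0, 0)).2|]))
        ([], [])
    (PySem.List.sorted g.1 (fun x => x) false, PySem.List.sorted g.2 (fun x => x) false))

-- ===== PORT B =====
-- B's rec(j, g1, g2): fuel k = j + 1 (k = 0 is Python's j < 0 base case).
def myGenRec (people : List (Int × Int)) (stair : List (Int × Int)) :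
    Nat → List Int → List Int → List (List Int × List Int)
  | 0, g1, g2 => [(PySem.List.sorted g1 (fun x => x) false, PySem.List.sorted g2 (fun x => x) false)]
  | k + 1, g1, g2 =>
    let p := PySem.List.pyGetD people (k : Int) (0, 0)
    let s0 := PySem.List.pyGetD stair 0 (0, 0)
    let s1 := PySem.List.pyGetD stair 1 (0, 0)
    let d1 := |p.1 - s0.1| + |p.2 - s0.2|
    let d2 := |p.1 - s1.1| + |p.2 - s1.2|
    myGenRec people stair k g1 (d2 :: g2) ++ myGenRec people stair k (d1 :: g1) g2

def my_gen_alt (people : List (Int × Int)) (stair : List (Int × Int)) : List (List Int × List Int) :=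
  myGenRec people stair people.length [] []

-- ===== PRECONDITION & SPEC =====
-- A raises IndexError (stair[0]/stair[1]) whenever people is nonempty and
-- stair has fewer than two entries; exactly those inputs are excluded.
def Pre_my_gen (people : List (Int × Int)) (stair : List (Int × Int)) : Prop :=
  people = [] ∨ 2 ≤ stair.length
instance (people : List (Int × Int)) (stair : List (Int × Int)) : Decidable (Pre_my_gen people stair) := by unfold Pre_my_gen; infer_instance
def pvWitness_my_gen : (List (Int × Int)) × (List (Int × Int)) := ([(0, 0), (1, 2)], [(0, 0), (5, 5)])

def Spec_my_gen (people : List (Int × Int)) (stair : List (Int × Int)) (out : List (List Int × List Int)) : Prop := out = my_gen_alt people stair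
instance (people : List (Int × Int)) (stair : List (Int × Int)) (out : List (List Int × List Int)) : Decidable (Spec_my_gen people stair out) := by unfold Spec_my_gen; infer_instance

-- ===== CLAIM (what is proved, stated in full; the proofs are below) =====
def Claim_equal_my_gen : Prop := ∀ (people : List (Int × Int)) (stair : List (Int × Int)), Dom_my_gen people stair → Pre_my_gen people stair → Spec_my_gen people stair (my_gen people stair)

-- ===== LEMMAS AND PROOFS =====

-- distances of person j to stair[0] / stair[1]
def pvD1 (people stair : List (Int × Int)) (j : Nat) : Int :=
  |(PySem.List.pyGetD people (j : Int) (0, 0)).1 - (PySem.List.pyGetD stair 0 (0, 0)).1| +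
  |(PySem.List.pyGetD people (j : Int) (0, 0)).2 - (PySem.List.pyGetD stair 0 (0, 0)).2|
def pvD2 (people stair : List (Int × Int)) (j : Nat) : Int :=
  |(PySem.List.pyGetD people (j : Int) (0, 0)).1 - (PySem.List.pyGetD stair 1 (0, 0)).1| +
  |(PySem.List.pyGetD people (j : Int) (0, 0)).2 - (PySem.List.pyGetD stair 1 (0, 0)).2|

-- the pair of distance lists A's inner loop builds for mask i over bits 0..m-1
def pvBits (people stair : List (Int × Int)) (i : Nat) : Nat → List Int × List Int
  | 0 => ([], [])
  | m + 1 =>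
    let prev := pvBits people stair i m
    if i.testBit m then (prev.1 ++ [pvD1 people stair m], prev.2)
    else (prev.1, prev.2 ++ [pvD2 people stair m])

lemma pv_cond_true (i m : Nat) (h : i.testBit m = true) :
    PySem.Int.band (i : Int) ((1 : Int) <<< ((((m : Int)).toNat : Nat) : Int)) ≠ 0 := by
  simp only [Int.toNat_natCast]
  rw [Int.one_shiftLeft, PySem.Int.band_natCast, Nat.and_two_pow, h]
  norm_num

lemma pv_cond_false (i m : Nat) (h : i.testBit m = false) :
    PySem.Int.band (i : Int) ((1 : Int) <<< ((((m : Int)).toNat : Nat) : Int)) = 0 := by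
  simp only [Int.toNat_natCast]
  rw [Int.one_shiftLeft, PySem.Int.band_natCast, Nat.and_two_pow, h]
  norm_num

-- A's inner fold over j = 0..m-1 computes pvBits
lemma pv_inner_eq (people stair : List (Int × Int)) (i m : Nat) :
    (PySem.List.pyRange 0 (m : Int) 1).foldl (fun g j =>
        if PySem.Int.band (i : Int) ((1 : Int) <<< j.toNat) ≠ 0 then
          (g.1 ++ [|(PySem.List.pyGetD people j (0, 0)).1 - (PySem.List.pyGetD stair 0 (0, 0)).1| +
                   |(PySem.List.pyGetD people j (0, 0)).2 - (PySem.List.pyGetD stair 0 (0, 0)).2|], g.2)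
        else
          (g.1, g.2 ++ [|(PySem.List.pyGetD people j (0, 0)).1 - (PySem.List.pyGetD stair 1 (0, 0)).1| +
                        |(PySem.List.pyGetD people j (0, 0)).2 - (PySem.List.pyGetD stair 1 (0, 0)).2|]))
      (([], []) : List Int × List Int) = pvBits people stair i m := by
  induction m with
  | zero => simp [PySem.List.pyRange_one_eq_nil, pvBits]
  | succ m ih =>
    rw [show ((m + 1 : Nat) : Int) = (m : Int) + 1 by push_cast; ring,
        PySem.List.pyRange_one_succ_right (by positivity), List.foldl_append, ih]
    simp only [List.foldl_cons, List.foldl_nil]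
    rcases h : i.testBit m with _ | _
    · rw [if_neg (by simpa using pv_cond_false i m h)]
      simp [pvBits, h, pvD2]
    · rw [if_pos (pv_cond_true i m h)]
      simp [pvBits, h, pvD1]

-- bits of a mask below 2^k are unchanged by adding 2^k, so pvBits agrees
lemma pv_bits_add (people stair : List (Int × Int)) (i k m : Nat) (hm : m ≤ k) :
    pvBits people stair (2 ^ k + i) m = pvBits people stair i m := by
  induction m with
  | zero => rfl
  | succ m ih =>
    have hmk : m < k := hm
    simp only [pvBits, ih (Nat.le_of_lt hmk), Nat.testBit_two_pow_add_gt hmk]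

lemma pv_bits_low (people stair : List (Int × Int)) (i k : Nat) (hi : i < 2 ^ k) :
    pvBits people stair i (k + 1) =
      ((pvBits people stair i k).1, (pvBits people stair i k).2 ++ [pvD2 people stair k]) := by
  simp [pvBits, Nat.testBit_lt_two_pow hi]

lemma pv_bits_high (people stair : List (Int × Int)) (i k : Nat) (hi : i < 2 ^ k) :
    pvBits people stair (2 ^ k + i) (k + 1) =
      ((pvBits people stair i k).1 ++ [pvD1 people stair k], (pvBits people stair i k).2) := by
  have ht : (2 ^ k + i).testBit k = true := by
    rw [Nat.testBit_two_pow_add_eq, Nat.testBit_lt_two_pow hi]; rfl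
  simp [pvBits, ht, pv_bits_add people stair i k k le_rfl]

-- B's recursion enumerates the same masks in the same order
lemma pv_rec_eq (people stair : List (Int × Int)) (k : Nat) (g1 g2 : List Int) :
    myGenRec people stair k g1 g2 =
      (List.range (2 ^ k)).map (fun i =>
        (PySem.List.sorted ((pvBits people stair i k).1 ++ g1) (fun x => x) false,
         PySem.List.sorted ((pvBits people stair i k).2 ++ g2) (fun x => x) false)) := by
  induction k generalizing g1 g2 with
  | zero => simp [myGenRec, pvBits]
  | succ k ih =>
    rw [show 2 ^ (k + 1) = 2 ^ k + 2 ^ k from by ring, List.range_add, List.map_append]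
    simp only [myGenRec, ih, List.map_map]
    congr 1
    · refine List.map_congr_left (fun i hi => ?_)
      rw [pv_bits_low people stair i k (List.mem_range.mp hi)]
      simp [pvD2]
    · refine List.map_congr_left (fun i hi => ?_)
      rw [Function.comp_apply, pv_bits_high people stair i k (List.mem_range.mp hi)]
      simp [pvD1, List.append_assoc]

-- ===== VERDICT (by name: the statement is the Claim_ definition above) =====
theorem my_gen_spec : Claim_equal_my_gen := by
  intro people stair _ _
  show my_gen people stair = my_gen_alt people stair
  rw [my_gen, ← Int.shiftLeft_natCast_right, Int.one_shiftLeft]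
  rw [PySem.List.pyRange_zero_nat (2 ^ people.length), List.map_map, my_gen_alt, pv_rec_eq]
  refine List.map_congr_left (fun i _ => ?_)
  simp only [Function.comp_apply, pv_inner_eq people stair i people.length, List.append_nil]
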